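-- pv_equiv track=rewrite | github.com/bstriner/graph-lm | graph_lm/tree_vis.py | delete_subtree
-- ===== SOURCE A (Python) =====
-- import itertools
--
-- DEAD = "__DEAD__"
--
-- def delete_subtree(layers, i_val, j_val):
--     js = [j_val]
--     depth = len(layers)
--     for i in range(i_val, depth):
--         for j in js:
--             layers[i][j] = DEAD
--         js = list(itertools.chain.from_iterable([j * 2, (j * 2) + 1] for j in js))
--     return layers
-- ===== SOURCE B (Python) =====
-- DEAD = "__DEAD__"
--
--
-- def _mark_subtree(layers, depth, i, j):
--     # depth-first: mark this node DEAD, then recurse into both children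
--     if i >= depth:
--         return
--     layers[i][j] = DEAD
--     _mark_subtree(layers, depth, i + 1, 2 * j)
--     _mark_subtree(layers, depth, i + 1, 2 * j + 1)
--
--
-- def delete_subtree(layers, i_val, j_val):
--     _mark_subtree(layers, len(layers), i_val, j_val)
--     return layers
-- ===== Notes on version B (the rewrite author's own statement) =====
-- stated objective: alternative
-- what changed: Replaces A's breadth-first frontier marking (an explicit per-level list of indices doubled with itertools.chain) by a recursive depth-first traversal of the implicit binary tree that carries no frontier list at all; since every visited cell is overwritten with the same constant, the traversal order is irrelevant.
import Mathlib
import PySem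

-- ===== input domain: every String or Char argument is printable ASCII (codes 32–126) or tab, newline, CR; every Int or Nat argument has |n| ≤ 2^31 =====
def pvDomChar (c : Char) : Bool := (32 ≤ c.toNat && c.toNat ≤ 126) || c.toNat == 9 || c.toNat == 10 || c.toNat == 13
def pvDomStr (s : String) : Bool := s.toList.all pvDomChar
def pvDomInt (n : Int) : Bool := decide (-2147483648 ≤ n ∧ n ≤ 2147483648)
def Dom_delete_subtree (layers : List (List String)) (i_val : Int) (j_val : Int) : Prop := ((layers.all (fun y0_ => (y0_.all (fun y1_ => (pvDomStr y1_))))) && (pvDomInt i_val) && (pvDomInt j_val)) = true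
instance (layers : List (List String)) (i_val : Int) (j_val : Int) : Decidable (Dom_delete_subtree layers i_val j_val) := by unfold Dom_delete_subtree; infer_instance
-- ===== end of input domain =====

-- B replaces A's breadth-first frontier marking by a recursive depth-first traversal (no frontier
-- list); both Pythons mutate `layers` in place and return it — the equivalence proved is about the
-- returned value, and B performs the same in-place mutation.

def pvDEAD : String := "__DEAD__"

-- Python index normalisation for `xs[i] = v`: negative i counts from the end, out of range is an
-- IndexError (exact on the stated domain). Both Pythons perform the very same assignment
-- `layers[i][j] = DEAD`, so both ports share this helper; the IndexError case (none) is totalised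
-- as a no-op and excluded by Pre_.
def pvNorm (n : Nat) (i : Int) : Option Nat :=
  if 0 ≤ i ∧ i < n then some i.toNat
  else if -(n : Int) ≤ i ∧ i < 0 then some (i + n).toNat
  else none

-- layers[i][j] = DEAD
def pvMark (L : List (List String)) (i j : Int) : List (List String) :=
  match pvNorm L.length i with
  | none => L
  | some r =>
    match pvNorm (L.getD r []).length j with
    | none => L
    | some c => L.set r ((L.getD r []).set c pvDEAD)

-- ===== PORT A =====
def delete_subtree (layers : List (List String)) (i_val : Int) (j_val : Int) : List (List String) :=
  let depth : Int := layers.length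
  let st := (PySem.List.pyRange i_val depth 1).foldl
    (fun (st : List (List String) × List Int) i =>
      let L := st.2.foldl (fun L j => pvMark L i j) st.1
      (L, st.2.flatMap (fun j => [j * 2, j * 2 + 1])))
    (layers, [j_val])
  st.1

-- ===== PORT B =====
-- _mark_subtree: len(layers) never changes (writes only replace cell contents), so it is passed
-- once as `depth` — this also gives the termination measure.
def pvMarkSub (depth : Int) (L : List (List String)) (i j : Int) : List (List String) :=
  if _h : depth ≤ i then L
  else pvMarkSub depth (pvMarkSub depth (pvMark L i j) (i + 1) (2 * j)) (i + 1) (2 * j + 1)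
termination_by (depth - i).toNat
decreasing_by all_goals omega

def delete_subtree_alt (layers : List (List String)) (i_val : Int) (j_val : Int) : List (List String) :=
  pvMarkSub (layers.length : Int) layers i_val j_val

-- ===== PRECONDITION & SPEC =====
-- Pre_ holds exactly when every assignment layers[i][j] = DEAD that A performs hits a valid
-- (possibly negative) Python index; otherwise A (and B alike) raise IndexError. At level i the
-- marked columns form the contiguous block [j_val*2^k, j_val*2^k + 2^k - 1], k = i - i_val.
def Pre_delete_subtree (layers : List (List String)) (i_val : Int) (j_val : Int) : Prop :=
  ((i_val < (layers.length : Int)) → -(layers.length : Int) ≤ i_val) ∧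
  ∀ k ∈ List.range (if -(layers.length : Int) ≤ i_val then ((layers.length : Int) - i_val).toNat else 0),
    (-(((layers.getD (if i_val + k < 0 then i_val + k + layers.length else i_val + k).toNat []).length : Int)) ≤ j_val * 2 ^ k ∧
      j_val * 2 ^ k + 2 ^ k - 1 < (((layers.getD (if i_val + k < 0 then i_val + k + layers.length else i_val + k).toNat []).length : Int)))

instance (layers : List (List String)) (i_val : Int) (j_val : Int) : Decidable (Pre_delete_subtree layers i_val j_val) := by unfold Pre_delete_subtree; infer_instance

def pvWitness_delete_subtree : List (List String) × Int × Int := ([["x"], ["a", "b"]], 0, 0)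

def Spec_delete_subtree (layers : List (List String)) (i_val : Int) (j_val : Int) (out : List (List String)) : Prop := out = delete_subtree_alt layers i_val j_val
instance (layers : List (List String)) (i_val : Int) (j_val : Int) (out : List (List String)) : Decidable (Spec_delete_subtree layers i_val j_val out) := by unfold Spec_delete_subtree; infer_instance

-- ===== CLAIM (what is proved, stated in full; the proofs are below) =====
def Claim_equal_delete_subtree : Prop := ∀ (layers : List (List String)) (i_val : Int) (j_val : Int), Dom_delete_subtree layers i_val j_val → Pre_delete_subtree layers i_val j_val → Spec_delete_subtree layers i_val j_val (delete_subtree layers i_val j_val)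

-- ===== LEMMAS AND PROOFS =====

-- The cells each side writes, as lists in each side's own order.
def pvCells (depth : Int) (i j : Int) : List (Int × Int) :=
  if depth ≤ i then []
  else (i, j) :: (pvCells depth (i + 1) (2 * j) ++ pvCells depth (i + 1) (2 * j + 1))
termination_by (depth - i).toNat
decreasing_by all_goals omega

def pvBfs : List Int → List Int → List (Int × Int)
  | [], _ => []
  | i :: is, js => js.map (fun j => (i, j)) ++ pvBfs is (js.flatMap fun j => [j * 2, j * 2 + 1])

theorem pvNorm_lt {n : Nat} {i : Int} {r : Nat} (h : pvNorm n i = some r) : r < n := by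
  unfold pvNorm at h
  split at h
  · injection h with h'; omega
  · split at h
    · injection h with h'; omega
    · exact absurd h (by simp)

theorem length_pvMark (L : List (List String)) (i j : Int) : (pvMark L i j).length = L.length := by
  unfold pvMark
  split
  · rfl
  split
  · rfl
  simp

theorem rowlen_pvMark (L : List (List String)) (i j : Int) (r' : Nat) :
    ((pvMark L i j).getD r' []).length = (L.getD r' []).length := by
  unfold pvMark
  split
  · rfl
  rename_i r hr
  split
  · rfl
  rename_i c hc
  have hrlt : r < L.length := pvNorm_lt hr
  by_cases h : r' = r
  · subst h
    simp [List.getD_eq_getElem?_getD, hrlt]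
  · simp [List.getD_eq_getElem?_getD, List.getElem?_set_ne (fun hh => h hh.symm)]

theorem getD_set_self {L : List (List String)} {r : Nat} (h : r < L.length) (x : List String) :
    (L.set r x).getD r [] = x := by
  simp [List.getD_eq_getElem?_getD, h]

theorem getD_set_ne {L : List (List String)} {r r' : Nat} (h : r' ≠ r) (x : List String) :
    (L.set r x).getD r' [] = L.getD r' [] := by
  simp [List.getD_eq_getElem?_getD, List.getElem?_set_ne (fun hh => h hh.symm)]

theorem rowlen_set {L : List (List String)} {r : Nat} (hr : r < L.length) {r' : Nat}
    (X : List String) (hX : X.length = (L.getD r []).length) :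
    ((L.set r X).getD r' []).length = (L.getD r' []).length := by
  by_cases h : r' = r
  · subst h
    rw [getD_set_self hr]
    exact hX
  · rw [getD_set_ne h]

theorem pvMark_eq_none1 {L : List (List String)} {i : Int} (j : Int)
    (h : pvNorm L.length i = none) : pvMark L i j = L := by
  simp only [pvMark, h]

theorem pvMark_eq_none2 {L : List (List String)} {i j : Int} {r : Nat}
    (hr : pvNorm L.length i = some r) (hc : pvNorm (L.getD r []).length j = none) :
    pvMark L i j = L := by
  simp only [pvMark, hr, hc]

theorem pvMark_eq_set {L : List (List String)} {i j : Int} {r c : Nat}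
    (hr : pvNorm L.length i = some r) (hc : pvNorm (L.getD r []).length j = some c) :
    pvMark L i j = L.set r ((L.getD r []).set c pvDEAD) := by
  simp only [pvMark, hr, hc]

theorem pvMark_comm (L : List (List String)) (i j i' j' : Int) :
    pvMark (pvMark L i j) i' j' = pvMark (pvMark L i' j') i j := by
  cases hr : pvNorm L.length i with
  | none =>
    have h2 : pvNorm (pvMark L i' j').length i = none := by rw [length_pvMark]; exact hr
    rw [pvMark_eq_none1 j hr, pvMark_eq_none1 j h2]
  | some r =>
    cases hc : pvNorm (L.getD r []).length j with
    | none =>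
      have h2 : pvNorm (pvMark L i' j').length i = some r := by rw [length_pvMark]; exact hr
      have h3 : pvNorm ((pvMark L i' j').getD r []).length j = none := by
        rw [rowlen_pvMark]; exact hc
      rw [pvMark_eq_none2 hr hc, pvMark_eq_none2 h2 h3]
    | some c =>
      cases hr' : pvNorm L.length i' with
      | none =>
        have h2 : pvNorm (pvMark L i j).length i' = none := by rw [length_pvMark]; exact hr'
        rw [pvMark_eq_none1 j' hr', pvMark_eq_none1 j' h2]
      | some r' =>
        cases hc' : pvNorm (L.getD r' []).length j' with
        | none =>
          have h2 : pvNorm (pvMark L i j).length i' = some r' := by rw [length_pvMark]; exact hr'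
          have h3 : pvNorm ((pvMark L i j).getD r' []).length j' = none := by
            rw [rowlen_pvMark]; exact hc'
          rw [pvMark_eq_none2 hr' hc', pvMark_eq_none2 h2 h3]
        | some c' =>
          have hrlt : r < L.length := pvNorm_lt hr
          have hrlt' : r' < L.length := pvNorm_lt hr'
          have h2 : pvNorm ((L.set r ((L.getD r []).set c pvDEAD))).length i' = some r' := by
            rw [List.length_set]; exact hr'
          have h3 : pvNorm (((L.set r ((L.getD r []).set c pvDEAD))).getD r' []).length j' = some c' := by
            rw [rowlen_set hrlt _ (by rw [List.length_set])]; exact hc'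
          have h4 : pvNorm ((L.set r' ((L.getD r' []).set c' pvDEAD))).length i = some r := by
            rw [List.length_set]; exact hr
          have h5 : pvNorm (((L.set r' ((L.getD r' []).set c' pvDEAD))).getD r []).length j = some c := by
            rw [rowlen_set hrlt' _ (by rw [List.length_set])]; exact hc
          rw [pvMark_eq_set hr hc, pvMark_eq_set hr' hc']
          rw [pvMark_eq_set h2 h3, pvMark_eq_set h4 h5]
          by_cases hrr : r' = r
          · subst hrr
            rw [getD_set_self hrlt, getD_set_self hrlt, List.set_set, List.set_set]
            by_cases hcc : c' = c
            · subst hcc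
              rfl
            · rw [List.set_comm _ _ (fun hh => hcc hh.symm)]
          · rw [getD_set_ne hrr, getD_set_ne (fun hh => hrr hh.symm),
                List.set_comm _ _ (fun hh => hrr hh.symm)]

theorem foldl_perm_eq {α β : Type} {f : β → α → β}
    (hc : ∀ b x y, f (f b x) y = f (f b y) x) {l₁ l₂ : List α} (p : l₁.Perm l₂) (b : β) :
    l₁.foldl f b = l₂.foldl f b := by
  induction p generalizing b with
  | nil => rfl
  | cons x _ ih => simp only [List.foldl_cons]; exact ih _
  | swap x y l => simp only [List.foldl_cons]; rw [hc]
  | trans _ _ ih₁ ih₂ => rw [ih₁, ih₂]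

theorem flatMap_pair (js : List Int) (g : Int → List (Int × Int)) :
    (js.flatMap fun j => [j * 2, j * 2 + 1]).flatMap g
      = js.flatMap fun j => g (j * 2) ++ g (j * 2 + 1) := by
  induction js with
  | nil => rfl
  | cons j js ih => simp [List.flatMap_cons, ih]

theorem pvBfs_perm (depth : Int) : ∀ (n : Nat) (i : Int), (depth - i).toNat = n →
    ∀ js : List Int,
    (pvBfs (PySem.List.pyRange i depth 1) js).Perm
      (js.flatMap (fun j => pvCells depth i j)) := by
  intro n
  induction n using Nat.strong_induction_on with
  | _ n ih =>
    intro i hn js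
    by_cases h : depth ≤ i
    · rw [PySem.List.pyRange_one_eq_nil h]
      have hc : (fun j => pvCells depth i j) = fun _ => ([] : List (Int × Int)) := by
        funext j; rw [pvCells]; simp [h]
      simp [pvBfs, hc]
    · rw [not_le] at h
      rw [PySem.List.pyRange_one_cons h]
      simp only [pvBfs]
      have ihh := ih ((depth - (i + 1)).toNat) (by omega) (i + 1) rfl
        (js.flatMap fun j => [j * 2, j * 2 + 1])
      refine ((List.Perm.refl _).append ihh).trans ?_
      rw [flatMap_pair]
      have hmap := List.map_append_flatMap_perm js (fun j => ((i : Int), j))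
        (fun j => pvCells depth (i + 1) (j * 2) ++ pvCells depth (i + 1) (j * 2 + 1))
      refine hmap.trans ?_
      have hcells : (fun j => ((i, j) : Int × Int) :: (pvCells depth (i + 1) (j * 2) ++ pvCells depth (i + 1) (j * 2 + 1)))
          = fun j => pvCells depth i j := by
        funext j
        conv_rhs => rw [pvCells]
        rw [if_neg (by omega : ¬ depth ≤ i), mul_comm j 2]
      rw [hcells]

theorem loopA_eq (is : List Int) (js : List Int) (L : List (List String)) :
    (is.foldl
      (fun (st : List (List String) × List Int) i =>
        let L := st.2.foldl (fun L j => pvMark L i j) st.1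
        (L, st.2.flatMap (fun j => [j * 2, j * 2 + 1])))
      (L, js)).1 = (pvBfs is js).foldl (fun L p => pvMark L p.1 p.2) L := by
  induction is generalizing js L with
  | nil => rfl
  | cons i is ih =>
    simp only [List.foldl_cons, pvBfs, List.foldl_append]
    rw [ih]
    congr 1
    rw [List.foldl_map]

theorem markSub_eq (depth : Int) : ∀ (n : Nat) (i : Int), (depth - i).toNat = n →
    ∀ (j : Int) (L : List (List String)),
    pvMarkSub depth L i j = (pvCells depth i j).foldl (fun L p => pvMark L p.1 p.2) L := by
  intro n
  induction n using Nat.strong_induction_on with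
  | _ n ih =>
    intro i hn j L
    rw [pvMarkSub, pvCells]
    by_cases h : depth ≤ i
    · simp [h]
    · simp only [if_neg h, dif_neg h, List.foldl_cons, List.foldl_append]
      rw [ih ((depth - (i + 1)).toNat) (by omega) (i + 1) rfl,
          ih ((depth - (i + 1)).toNat) (by omega) (i + 1) rfl]

-- ===== VERDICT (by name: the statement is the Claim_ definition above) =====
theorem delete_subtree_spec : Claim_equal_delete_subtree := by
  intro layers i_val j_val _ _
  unfold Spec_delete_subtree delete_subtree delete_subtree_alt
  rw [loopA_eq, markSub_eq (layers.length : Int) _ i_val rfl]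
  have hp := pvBfs_perm (layers.length : Int) _ i_val rfl [j_val]
  have heq := foldl_perm_eq (f := fun L (p : Int × Int) => pvMark L p.1 p.2)
    (fun b x y => pvMark_comm b x.1 x.2 y.1 y.2) hp layers
  simpa using heq
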